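-- pv_equiv track=rewrite | github.com/qeedquan/challenges | uva/11952-arithmetic/11952-arithmetic.py | solve
-- ===== SOURCE A (Python) =====
-- def convb(n, b, p):
--     if b < 1:
--         return 0
--
--     d = []
--     while n > 0:
--         d.append(n % b)
--         n //= b
--
--     r = 0
--     for i in range(len(d)-1, -1, -1):
--         r = (r * p) + d[i]
--     return r
--
-- def solve(x, y, z):
--     n = max(x, y, 36) + 1
--     for i in range(1, n):
--         a = convb(x, 10, i)
--         b = convb(y, 10, i)
--         c = convb(z, 10, i)
--         if a+b == c:
--             return i
--     return 0
-- ===== SOURCE B (Python) =====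
-- # Faster exact re-implementation: the check "digits(x)+digits(y)==digits(z) read in base i"
-- # says i is a root of the polynomial P(t) = X(t)+Y(t)-Z(t) whose coefficients lie in [-9, 18].
-- # If P is not identically zero, any root satisfies |i| < 19 (Cauchy bound); if P is zero,
-- # base 1 already works.  A's scan range always contains 1..36, so scanning only 1..36 is exact.
--
-- def _digs(n):
--     d = []
--     while n > 0:
--         n, r = divmod(n, 10)
--         d.append(r)
--     return d
--
-- def solve(x, y, z):
--     dx, dy, dz = _digs(x), _digs(y), _digs(z)
--     m = max(len(dx), len(dy), len(dz))
--     coeffs = [(dx[j] if j < len(dx) else 0)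
--               + (dy[j] if j < len(dy) else 0)
--               - (dz[j] if j < len(dz) else 0) for j in range(m)]
--     for i in range(1, 37):
--         v = 0
--         for c in reversed(coeffs):
--             v = v * i + c
--         if v == 0:
--             return i
--     return 0
-- ===== Notes on version B (the rewrite author's own statement) =====
-- stated objective: faster
-- what changed: B folds the three digit strings into one polynomial P(t)=X(t)+Y(t)-Z(t) with coefficients in [-9,18] and, by the Cauchy root bound (any root of a nonzero such P is < 19, and the zero P already has base 1), scans only the constant base range 1..36 instead of A's 1..max(x,y,36).
import Mathlib
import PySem

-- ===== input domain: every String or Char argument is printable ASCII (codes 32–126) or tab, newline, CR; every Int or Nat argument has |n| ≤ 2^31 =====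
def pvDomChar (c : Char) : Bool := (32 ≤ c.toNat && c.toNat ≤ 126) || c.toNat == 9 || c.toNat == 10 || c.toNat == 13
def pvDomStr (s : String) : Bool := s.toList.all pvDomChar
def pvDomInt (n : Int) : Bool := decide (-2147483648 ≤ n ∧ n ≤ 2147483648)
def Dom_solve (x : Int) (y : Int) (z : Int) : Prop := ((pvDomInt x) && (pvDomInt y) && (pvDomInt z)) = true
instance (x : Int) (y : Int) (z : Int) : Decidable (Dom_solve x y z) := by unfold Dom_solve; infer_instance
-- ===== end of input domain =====

-- B scans only bases 1..36 (Cauchy root bound on one combined polynomial) instead of A's 1..max(x,y,36): asymptotically faster.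


-- ===== PORT A =====
-- the 'while n > 0: d.append(n % b); n //= b' loop.  Python diverges here when n > 0 and b = 1
-- (and would loop on b ≤ 0 too, but convb guards b < 1); solve only calls it with b = 10, where
-- this recursion is exact, so the 1 < b test only serves termination.
def convbLoop (n b : Int) : List Int :=
  if _h : 0 < n ∧ 1 < b then
    PySem.Int.mod n b :: convbLoop (PySem.Int.floordiv n b) b
  else []
termination_by n.toNat
decreasing_by
  rw [PySem.Int.floordiv_eq_ediv_of_pos (by omega)]
  have h1 := Int.mul_ediv_add_emod n b
  have h2 := Int.emod_nonneg n (by omega : b ≠ 0)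
  have h4 : 0 ≤ n / b := Int.ediv_nonneg (by omega) (by omega)
  have h5 : n / b < n := by nlinarith
  omega

def convb (n b p : Int) : Int :=
  if b < 1 then 0
  else
    -- 'for i in range(len(d)-1, -1, -1): r = r*p + d[i]' traverses d back to front
    (convbLoop n b).reverse.foldl (fun r dj => r * p + dj) 0

def solve (x : Int) (y : Int) (z : Int) : Int :=
  let n := max (max x y) 36 + 1
  match (PySem.List.pyRange 1 n 1).find?
      (fun i => convb x 10 i + convb y 10 i == convb z 10 i) with
  | some i => i
  | none => 0

-- ===== PORT B =====
-- the 'while n > 0: n, r = divmod(n, 10); d.append(r)' loop of _digs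
def digsB (n : Int) : List Int :=
  if _h : 0 < n then
    PySem.Int.mod n 10 :: digsB (PySem.Int.floordiv n 10)
  else []
termination_by n.toNat
decreasing_by
  rw [PySem.Int.floordiv_eq_ediv_of_pos (by omega)]
  omega

def solve_alt (x : Int) (y : Int) (z : Int) : Int :=
  let dx := digsB x
  let dy := digsB y
  let dz := digsB z
  let m := max (max dx.length dy.length) dz.length
  let coeffs := (List.range m).map (fun j => dx.getD j 0 + dy.getD j 0 - dz.getD j 0)
  match (PySem.List.pyRange 1 37 1).find?
      (fun i => coeffs.reverse.foldl (fun v c => v * i + c) 0 == 0) with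
  | some i => i
  | none => 0

-- ===== PRECONDITION & SPEC =====
def Spec_solve (x : Int) (y : Int) (z : Int) (out : Int) : Prop := out = solve_alt x y z
instance (x : Int) (y : Int) (z : Int) (out : Int) : Decidable (Spec_solve x y z out) := by unfold Spec_solve; infer_instance

-- ===== CLAIM (what is proved, stated in full; the proofs are below) =====
def Claim_equal_solve : Prop := ∀ (x : Int) (y : Int) (z : Int), Dom_solve x y z → Spec_solve x y z (solve x y z)

-- ===== LEMMAS AND PROOFS =====

-- little-endian polynomial evaluation (the shared Horner shape of both inner loops)
def evalP (l : List Int) (i : Int) : Int := l.foldr (fun c v => v * i + c) 0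

theorem evalP_cons (c : Int) (t : List Int) (i : Int) :
    evalP (c :: t) i = evalP t i * i + c := rfl

theorem foldl_reverse_evalP (l : List Int) (i : Int) :
    l.reverse.foldl (fun v c => v * i + c) 0 = evalP l i := by
  rw [List.foldl_reverse]; rfl

theorem convb_eval (n i : Int) : convb n 10 i = evalP (convbLoop n 10) i := by
  unfold convb
  rw [if_neg (by omega)]
  exact foldl_reverse_evalP _ _

theorem convbLoop_eq_digsB (n : Int) : convbLoop n 10 = digsB n := by
  fun_induction digsB n with
  | case1 n h ih => rw [convbLoop.eq_def, dif_pos ⟨h, by omega⟩, ih]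
  | case2 n h => rw [convbLoop.eq_def, dif_neg (by omega)]

theorem digsB_bounds (n : Int) : ∀ c ∈ digsB n, 0 ≤ c ∧ c < 10 := by
  fun_induction digsB n with
  | case1 n h ih =>
    intro c hc
    rcases List.mem_cons.mp hc with rfl | hc
    · exact ⟨PySem.Int.mod_nonneg _ (by omega), PySem.Int.mod_lt _ (by omega)⟩
    · exact ih c hc
  | case2 n h => intro c hc; simp at hc

-- evaluation of a zero-coefficient range comprehension
theorem evalP_range_zero (m : ℕ) (i : Int) :
    evalP ((List.range m).map (fun _ => (0 : Int))) i = 0 := by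
  induction m with
  | zero => rfl
  | succ m ih =>
    rw [List.range_succ_eq_map, List.map_cons, List.map_map, evalP_cons]
    have : ((fun _ => (0:Int)) ∘ Nat.succ) = fun _ => (0:Int) := rfl
    rw [this, ih]; ring

-- evaluating the comprehension '[f j + g j - h j for j in range m]' is linear
theorem evalP_range_lin (m : ℕ) (f g h : ℕ → Int) (i : Int) :
    evalP ((List.range m).map (fun j => f j + g j - h j)) i =
      evalP ((List.range m).map f) i + evalP ((List.range m).map g) i
        - evalP ((List.range m).map h) i := by
  induction m generalizing f g h with
  | zero => rfl
  | succ m ih =>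
    rw [List.range_succ_eq_map]
    simp only [List.map_cons, List.map_map, evalP_cons, Function.comp_def]
    rw [ih (fun j => f j.succ) (fun j => g j.succ) (fun j => h j.succ)]
    ring

-- padding a list with getD-zeros up to m ≥ length does not change its value
theorem evalP_range_getD (m : ℕ) (l : List Int) (i : Int) (hm : l.length ≤ m) :
    evalP ((List.range m).map (fun j => l.getD j 0)) i = evalP l i := by
  induction m generalizing l with
  | zero =>
    have : l = [] := List.eq_nil_of_length_eq_zero (by omega)
    subst this; rfl
  | succ m ih =>
    rw [List.range_succ_eq_map, List.map_cons, List.map_map]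
    cases l with
    | nil =>
      have : ((fun j => List.getD ([] : List Int) j 0) ∘ Nat.succ) = fun _ => (0:Int) := rfl
      rw [this, evalP_cons, evalP_range_zero]; simp [evalP]
    | cons a t =>
      have : ((fun j => (a :: t).getD j 0) ∘ Nat.succ) = fun j => t.getD j 0 := rfl
      rw [this, evalP_cons, ih t (by simpa using hm)]
      rfl

-- the combined-coefficient polynomial evaluates to X(i)+Y(i)-Z(i)
theorem evalP_coeffs (dx dy dz : List Int) (i : Int) :
    evalP ((List.range (max (max dx.length dy.length) dz.length)).map
      (fun j => dx.getD j 0 + dy.getD j 0 - dz.getD j 0)) i =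
      evalP dx i + evalP dy i - evalP dz i := by
  rw [evalP_range_lin, evalP_range_getD _ _ _ (by omega),
      evalP_range_getD _ _ _ (by omega), evalP_range_getD _ _ _ (by omega)]

-- for base ≥ 19 a root forces every coefficient to vanish
theorem evalP_root_all_zero (l : List Int) (i : Int) (hi : 19 ≤ i)
    (hb : ∀ c ∈ l, |c| ≤ 18) (hr : evalP l i = 0) : ∀ c ∈ l, c = 0 := by
  induction l with
  | nil => intro c hc; simp at hc
  | cons a t ih =>
    rw [evalP_cons] at hr
    have ht0 : evalP t i = 0 := by
      by_contra h
      have h1 : (1 : Int) ≤ |evalP t i| := by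
        rcases abs_pos.mpr h with h'; omega
      have ha : |a| ≤ 18 := hb a List.mem_cons_self
      have : |a| = |evalP t i| * i := by
        have : a = -(evalP t i * i) := by linarith
        rw [this, abs_neg, abs_mul, abs_of_nonneg (by omega : (0:Int) ≤ i)]
      nlinarith
    have ha0 : a = 0 := by rw [ht0] at hr; linarith
    intro c hc
    rcases List.mem_cons.mp hc with rfl | hc
    · exact ha0
    · exact ih (fun c hc => hb c (List.mem_cons_of_mem _ hc)) ht0 c hc

theorem find?_congr_mem (p q : Int → Bool) (l : List Int)
    (h : ∀ x ∈ l, p x = q x) : l.find? p = l.find? q := by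
  induction l with
  | nil => rfl
  | cons a t ih =>
    simp only [List.find?_cons, h a List.mem_cons_self]
    cases q a
    · exact ih (fun x hx => h x (List.mem_cons_of_mem _ hx))
    · rfl

theorem evalP_all_zero (l : List Int) (i : Int) (hz : ∀ c ∈ l, c = 0) :
    evalP l i = 0 := by
  induction l with
  | nil => rfl
  | cons a t ih =>
    rw [evalP_cons, hz a List.mem_cons_self,
        ih (fun c hc => hz c (List.mem_cons_of_mem _ hc))]
    ring

-- ===== VERDICT (by name: the statement is the Claim_ definition above) =====
theorem solve_spec : Claim_equal_solve := by
  intro x y z _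
  unfold Spec_solve solve solve_alt
  dsimp only
  set dx := digsB x with hdx
  set dy := digsB y with hdy
  set dz := digsB z with hdz
  set m := max (max dx.length dy.length) dz.length with hm
  set coeffs := (List.range m).map (fun j => dx.getD j 0 + dy.getD j 0 - dz.getD j 0)
    with hcoeffs
  -- both predicates test the same polynomial value
  have hpred : ∀ i : Int,
      (convb x 10 i + convb y 10 i == convb z 10 i)
        = (coeffs.reverse.foldl (fun v c => v * i + c) 0 == 0) := by
    intro i
    rw [foldl_reverse_evalP, hcoeffs, hm, evalP_coeffs,
        convb_eval, convb_eval, convb_eval, convbLoop_eq_digsB,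
        convbLoop_eq_digsB, convbLoop_eq_digsB, ← hdx, ← hdy, ← hdz]
    by_cases h : evalP dx i + evalP dy i = evalP dz i
    · simp [h]
    · simp [sub_eq_zero, h]
  have hcb : ∀ c ∈ coeffs, |c| ≤ 18 := by
    intro c hc
    rw [hcoeffs] at hc
    rcases List.mem_map.mp hc with ⟨j, _, rfl⟩
    have bx := digsB_bounds x (dx.getD j 0)
    have by' := digsB_bounds y (dy.getD j 0)
    have bz := digsB_bounds z (dz.getD j 0)
    have hgx : 0 ≤ dx.getD j 0 ∧ dx.getD j 0 < 10 := by
      by_cases hj : j < dx.length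
      · exact bx (by rw [List.getD_eq_getElem _ _ hj]; exact List.getElem_mem hj)
      · rw [List.getD_eq_default _ _ (by omega)]; norm_num
    have hgy : 0 ≤ dy.getD j 0 ∧ dy.getD j 0 < 10 := by
      by_cases hj : j < dy.length
      · exact by' (by rw [List.getD_eq_getElem _ _ hj]; exact List.getElem_mem hj)
      · rw [List.getD_eq_default _ _ (by omega)]; norm_num
    have hgz : 0 ≤ dz.getD j 0 ∧ dz.getD j 0 < 10 := by
      by_cases hj : j < dz.length
      · exact bz (by rw [List.getD_eq_getElem _ _ hj]; exact List.getElem_mem hj)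
      · rw [List.getD_eq_default _ _ (by omega)]; norm_num
    rw [abs_le]; omega
  -- split A's range at 37
  have hN : (37 : Int) ≤ max (max x y) 36 + 1 := by
    have := le_max_right (max x y) 36; omega
  rw [PySem.List.pyRange_one_append 1 37 (max (max x y) 36 + 1) (by omega) hN,
      List.find?_append]
  -- same predicate on the shared prefix
  have hfind : (PySem.List.pyRange 1 37 1).find?
      (fun i => convb x 10 i + convb y 10 i == convb z 10 i)
      = (PySem.List.pyRange 1 37 1).find?
      (fun i => coeffs.reverse.foldl (fun v c => v * i + c) 0 == 0) := by
    exact find?_congr_mem _ _ _ (fun i _ => hpred i)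
  rw [hfind]
  cases hfp : (PySem.List.pyRange 1 37 1).find?
      (fun i => coeffs.reverse.foldl (fun v c => v * i + c) 0 == 0) with
  | some i => simp
  | none =>
    -- no root in 1..36: in particular base 1 fails, so the coefficients are not all zero,
    -- hence (Cauchy bound) no base ≥ 37 is a root either
    have h1 : ¬ (evalP coeffs 1 = 0) := by
      have := List.find?_eq_none.mp hfp 1
        (by rw [PySem.List.mem_pyRange_one]; omega)
      intro hcon
      rw [foldl_reverse_evalP, hcon] at this
      simp at this
    have htail : (PySem.List.pyRange 37 (max (max x y) 36 + 1) 1).find?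
        (fun i => convb x 10 i + convb y 10 i == convb z 10 i) = none := by
      apply List.find?_eq_none.mpr
      intro i hi
      rw [PySem.List.mem_pyRange_one] at hi
      rw [hpred i, foldl_reverse_evalP]
      by_contra hcon
      simp only [beq_iff_eq] at hcon
      exact h1 (evalP_all_zero coeffs 1
        (evalP_root_all_zero coeffs i (by omega) hcb hcon))
    rw [htail]
    rfl
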